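-- pv_equiv track=rewrite | github.com/BitSpectreLabs/SpectreScan | spectrescan/core/utils.py | _split_targets_with_ipv6
-- ===== SOURCE A (Python) =====
-- from typing import List, Tuple, Optional, Union
--
-- def _split_targets_with_ipv6(target_string: str) -> List[str]:
--     """
--     Split comma-separated targets while preserving bracketed IPv6 addresses.
--
--     Args:
--         target_string: Comma-separated target string
--
--     Returns:
--         List of individual targets
--
--     Examples:
--         >>> _split_targets_with_ipv6("192.168.1.1,[2001:db8::1],example.com")
--         ['192.168.1.1', '[2001:db8::1]', 'example.com']
--     """
--     targets = []
--     current = ""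
--     bracket_depth = 0
--
--     for char in target_string:
--         if char == '[':
--             bracket_depth += 1
--             current += char
--         elif char == ']':
--             bracket_depth -= 1
--             current += char
--         elif char == ',' and bracket_depth == 0:
--             if current.strip():
--                 targets.append(current.strip())
--             current = ""
--         else:
--             current += char
--
--     if current.strip():
--         targets.append(current.strip())
--
--     return targets
-- ===== SOURCE B (Python) =====
-- def _split_targets_with_ipv6(target_string):
--     # Two-pass: record raw slices between top-level commas, then strip/filter.
--     parts = []
--     depth = 0
--     start = 0
--     for i, ch in enumerate(target_string):
--         if ch == '[':
--             depth += 1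
--         elif ch == ']':
--             depth -= 1
--         elif ch == ',' and depth == 0:
--             parts.append(target_string[start:i])
--             start = i + 1
--     parts.append(target_string[start:])
--     return [t for t in (p.strip() for p in parts) if t]
-- ===== Notes on version B (the rewrite author's own statement) =====
-- stated objective: alternative
-- what changed: B replaces A's character-by-character accumulation of the current token with index-based slicing: it records the start index, slices the raw substring at each top-level comma and at the end, then strips and filters the collected slices in a second pass.
import Mathlib
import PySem

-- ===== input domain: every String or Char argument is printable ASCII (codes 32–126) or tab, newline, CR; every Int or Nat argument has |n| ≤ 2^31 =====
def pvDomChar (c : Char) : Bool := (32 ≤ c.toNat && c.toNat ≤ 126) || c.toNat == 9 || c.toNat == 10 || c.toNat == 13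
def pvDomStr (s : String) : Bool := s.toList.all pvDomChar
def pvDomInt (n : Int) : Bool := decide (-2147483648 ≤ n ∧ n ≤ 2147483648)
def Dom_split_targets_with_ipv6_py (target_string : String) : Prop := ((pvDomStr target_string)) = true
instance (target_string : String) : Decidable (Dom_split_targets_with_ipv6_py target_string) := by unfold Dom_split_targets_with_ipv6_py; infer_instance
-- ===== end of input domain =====

-- B splits by recording start indices and slicing raw substrings (then strips/filters in a second pass) instead of A's character-by-character accumulation; alternative decomposition, same cost.

-- ===== PORT A =====
-- A's loop state: (targets, current, bracket_depth); Python strings kept as List Char.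
def pvAStep (st : List (List Char) × List Char × Int) (c : Char) :
    List (List Char) × List Char × Int :=
  let (ts, cur, d) := st
  if c = '[' then (ts, cur ++ [c], d + 1)
  else if c = ']' then (ts, cur ++ [c], d - 1)
  else if c = ',' ∧ d = 0 then
    (if PySem.Chars.strip cur ≠ [] then ts ++ [PySem.Chars.strip cur] else ts, [], d)
  else (ts, cur ++ [c], d)

-- the trailing 'if current.strip(): targets.append(current.strip())' after A's loop
def pvAFin (st : List (List Char) × List Char × Int) : List (List Char) :=
  if PySem.Chars.strip st.2.1 ≠ [] then st.1 ++ [PySem.Chars.strip st.2.1] else st.1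

def split_targets_with_ipv6_py (target_string : String) : List String :=
  (pvAFin (target_string.toList.foldl pvAStep ([], [], 0))).map String.ofList

-- ===== PORT B =====
-- B's loop state: (parts, depth, start); parts holds raw (unstripped) slices.
def pvBStep (cs : List Char) (st : List (List Char) × Int × Int) (p : Int × Char) :
    List (List Char) × Int × Int :=
  let (parts, depth, start) := st
  let (i, ch) := p
  if ch = '[' then (parts, depth + 1, start)
  else if ch = ']' then (parts, depth - 1, start)
  else if ch = ',' ∧ depth = 0 then
    (parts ++ [PySem.List.slice cs (some start) (some i)], depth, i + 1)
  else (parts, depth, start)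

-- the trailing 'parts.append(target_string[start:])' after B's loop
def pvBFin (cs : List Char) (st : List (List Char) × Int × Int) : List (List Char) :=
  st.1 ++ [PySem.List.slice cs (some st.2.2) none]

def split_targets_with_ipv6_py_alt (target_string : String) : List String :=
  (pvBFin target_string.toList
      ((PySem.List.enumerate target_string.toList 0).foldl
        (pvBStep target_string.toList) ([], 0, 0))).filterMap
    fun p =>
      if PySem.Chars.strip p ≠ [] then some (String.ofList (PySem.Chars.strip p)) else none

-- ===== PRECONDITION & SPEC =====
def Spec_split_targets_with_ipv6_py (target_string : String) (out : List String) : Prop := out = split_targets_with_ipv6_py_alt target_string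
instance (target_string : String) (out : List String) : Decidable (Spec_split_targets_with_ipv6_py target_string out) := by unfold Spec_split_targets_with_ipv6_py; infer_instance

-- ===== CLAIM (what is proved, stated in full; the proofs are below) =====
def Claim_equal_split_targets_with_ipv6_py : Prop := ∀ (target_string : String), Dom_split_targets_with_ipv6_py target_string → Spec_split_targets_with_ipv6_py target_string (split_targets_with_ipv6_py target_string)

-- ===== LEMMAS AND PROOFS =====

-- Common reference: raw segments of the remaining characters, given the current segment and depth.
def pvSegs (cur : List Char) (d : Int) : List Char → List (List Char)
  | [] => [cur]
  | c :: cs =>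
    if c = '[' then pvSegs (cur ++ [c]) (d + 1) cs
    else if c = ']' then pvSegs (cur ++ [c]) (d - 1) cs
    else if c = ',' ∧ d = 0 then cur :: pvSegs [] d cs
    else pvSegs (cur ++ [c]) d cs

def pvStripF (p : List Char) : Option (List Char) :=
  if PySem.Chars.strip p ≠ [] then some (PySem.Chars.strip p) else none

lemma pvA_raw (cs : List Char) : ∀ (ts : List (List Char)) (cur : List Char) (d : Int),
    pvAFin (cs.foldl pvAStep (ts, cur, d)) = ts ++ (pvSegs cur d cs).filterMap pvStripF := by
  induction cs with
  | nil =>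
    intro ts cur d
    simp only [List.foldl_nil, pvAFin, pvSegs, List.filterMap, pvStripF]
    split <;> simp
  | cons c cs ih =>
    intro ts cur d
    rw [List.foldl_cons]
    by_cases h1 : c = '['
    · subst h1
      have hstep : pvAStep (ts, cur, d) '[' = (ts, cur ++ ['['], d + 1) := by simp [pvAStep]
      rw [hstep, ih]
      simp [pvSegs]
    · by_cases h2 : c = ']'
      · subst h2
        have hstep : pvAStep (ts, cur, d) ']' = (ts, cur ++ [']'], d - 1) := by
          simp [pvAStep]
        rw [hstep, ih]
        simp [pvSegs]
      · by_cases h3 : c = ',' ∧ d = 0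
        · obtain ⟨hc, hd⟩ := h3
          subst hc; subst hd
          have hstep : pvAStep (ts, cur, 0) ',' =
              (if PySem.Chars.strip cur ≠ [] then ts ++ [PySem.Chars.strip cur] else ts,
               [], 0) := by simp [pvAStep]
          rw [hstep, ih]
          simp only [pvSegs, pvStripF]
          split <;> simp_all
        · have hstep : pvAStep (ts, cur, d) c = (ts, cur ++ [c], d) := by
            simp [pvAStep, h1, h2, h3]
          rw [hstep, ih]
          simp [pvSegs, h1, h2, h3]

lemma pvB_raw : ∀ (rest pre : List Char) (parts : List (List Char)) (d : Int) (start : Nat),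
    start ≤ pre.length →
    pvBFin (pre ++ rest)
        ((PySem.List.enumerate rest (pre.length : Int)).foldl
          (pvBStep (pre ++ rest)) (parts, d, (start : Int)))
      = parts ++ pvSegs (pre.drop start) d rest := by
  intro rest
  induction rest with
  | nil =>
    intro pre parts d start h
    simp [PySem.List.enumerate, pvBFin, pvSegs, PySem.List.slice_from_natCast]
  | cons c rest ih =>
    intro pre parts d start h
    rw [PySem.List.enumerate_cons, List.foldl_cons]
    have hpre : pre ++ c :: rest = (pre ++ [c]) ++ rest := by simp
    have hlen : ((pre.length : Int) + 1) = (((pre ++ [c]).length : Nat) : Int) := by simp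
    by_cases h1 : c = '['
    · subst h1
      have hstep : pvBStep (pre ++ '[' :: rest) (parts, d, (start : Int))
          ((pre.length : Int), '[') = (parts, d + 1, (start : Int)) := by simp [pvBStep]
      rw [hstep, hpre, hlen, ih (pre ++ ['[']) parts (d + 1) start (by simp; omega),
        List.drop_append_of_le_length h]
      simp [pvSegs]
    · by_cases h2 : c = ']'
      · subst h2
        have hstep : pvBStep (pre ++ ']' :: rest) (parts, d, (start : Int))
            ((pre.length : Int), ']') = (parts, d - 1, (start : Int)) := by simp [pvBStep]
        rw [hstep, hpre, hlen, ih (pre ++ [']']) parts (d - 1) start (by simp; omega),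
          List.drop_append_of_le_length h]
        simp [pvSegs, h1]
      · by_cases h3 : c = ',' ∧ d = 0
        · obtain ⟨hc, hd⟩ := h3
          subst hc; subst hd
          have hslice : PySem.List.slice (pre ++ ',' :: rest) (some (start : Int))
              (some (pre.length : Int)) = pre.drop start := by
            rw [PySem.List.slice_natCast, List.drop_append_of_le_length h,
              List.take_append_of_le_length (by simp),
              List.take_of_length_le (by simp)]
          have hstep : pvBStep (pre ++ ',' :: rest) (parts, 0, (start : Int))
              ((pre.length : Int), ',') =
              (parts ++ [pre.drop start], 0, (pre.length : Int) + 1) := by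
            simp [pvBStep, hslice]
          rw [hstep, hpre, hlen,
            ih (pre ++ [',']) (parts ++ [pre.drop start]) 0 (pre ++ [',']).length le_rfl,
            List.drop_length]
          simp [pvSegs]
        · have hstep : pvBStep (pre ++ c :: rest) (parts, d, (start : Int))
              ((pre.length : Int), c) = (parts, d, (start : Int)) := by
            simp only [pvBStep]
            rw [if_neg h1, if_neg h2, if_neg h3]
          rw [hstep, hpre, hlen, ih (pre ++ [c]) parts d start (by simp; omega),
            List.drop_append_of_le_length h]
          simp [pvSegs, h1, h2, h3]

theorem split_targets_with_ipv6_py_main (s : String) :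
    split_targets_with_ipv6_py s = split_targets_with_ipv6_py_alt s := by
  unfold split_targets_with_ipv6_py split_targets_with_ipv6_py_alt
  rw [pvA_raw s.toList [] [] 0]
  have hB := pvB_raw s.toList [] [] 0 0 (by simp)
  simp only [List.nil_append, List.length_nil, Nat.cast_zero, List.drop_nil] at hB
  rw [hB, List.nil_append, List.map_filterMap]
  apply List.filterMap_congr
  intro p _
  simp only [pvStripF]
  split <;> simp

-- ===== VERDICT (by name: the statement is the Claim_ definition above) =====
theorem split_targets_with_ipv6_py_spec : Claim_equal_split_targets_with_ipv6_py := by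
  intro s _
  exact split_targets_with_ipv6_py_main s
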